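-- pv_equiv track=rewrite | github.com/starsparrow/challenges | advent-of-code/2017/day03/solution.py | make_sequential_grid
-- ===== SOURCE A (Python) =====
-- def make_sequential_grid(max_value):
--     # Initialize
--     grid = [(0, 0)]
--     direction = 'E'
--     position = grid[0]
--     min_row = 0
--     max_row = 0
--     min_col = 0
--     max_col = 0
--
--     while len(grid) < max_value:
--         if direction == 'E':
--             while position[0] <= max_col:
--                 position = (position[0] + 1, position[1])
--                 grid.append(position)
--             max_col = position[0]
--             direction = 'N'
--         elif direction == 'N':
--             while position[1] <= max_row:
--                 position = (position[0], position[1] + 1)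
--                 grid.append(position)
--             max_row = position[1]
--             direction = 'W'
--         elif direction == 'W':
--             while position[0] >= min_col:
--                 position = (position[0] - 1, position[1])
--                 grid.append(position)
--             min_col = position[0]
--             direction = 'S'
--         elif direction == 'S':
--             while position[1] >= min_row:
--                 position = (position[0], position[1] - 1)
--                 grid.append(position)
--             min_row = position[1]
--             direction = 'E'
--
--     return grid
-- ===== SOURCE B (Python) =====
-- def make_sequential_grid(max_value):
--     # Leg-length driven spiral walk: legs whose lengths repeat twice and grow by one, cycling E,N,W,S.
--     grid = [(0, 0)]
--     position = (0, 0)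
--     directions = [(1, 0), (0, 1), (-1, 0), (0, -1)]
--     d = 0
--     step_len = 1
--     while len(grid) < max_value:
--         dx, dy = directions[d]
--         for _ in range(step_len):
--             position = (position[0] + dx, position[1] + dy)
--             grid.append(position)
--         if d % 2 == 1:
--             step_len += 1
--         d = (d + 1) % 4
--     return grid
-- ===== Notes on version B (the rewrite author's own statement) =====
-- stated objective: alternative
-- what changed: B walks the spiral by the classic leg-length pattern (each leg length occurring twice, growing by one after every second leg) with a cycling direction vector and fixed-count legs, instead of A's four min/max bounds with condition-driven inner while loops.
import Mathlib
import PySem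

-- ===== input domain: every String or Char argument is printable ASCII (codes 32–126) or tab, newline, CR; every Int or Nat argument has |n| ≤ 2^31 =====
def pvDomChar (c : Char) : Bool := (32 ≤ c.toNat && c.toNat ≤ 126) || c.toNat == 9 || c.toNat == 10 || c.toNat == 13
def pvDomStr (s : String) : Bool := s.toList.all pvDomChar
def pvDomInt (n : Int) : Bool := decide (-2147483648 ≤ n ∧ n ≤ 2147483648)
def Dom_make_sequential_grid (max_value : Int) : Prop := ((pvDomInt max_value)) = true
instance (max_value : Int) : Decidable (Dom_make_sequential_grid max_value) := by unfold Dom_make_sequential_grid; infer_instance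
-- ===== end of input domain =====

-- B replaces A's four-bounds bookkeeping by the closed leg-length pattern (each
-- length twice, growing after every second leg) with a cycling direction vector (alternative decomposition, same cost).

-- ===== PORT A =====
-- Inner 'while' loops of A, one per direction; terminating because the moving coordinate
-- approaches the fixed bound.  Each returns (final position, grid with appended cells).

def legE (maxCol : Int) (pos : Int × Int) (grid : List (Int × Int)) :
    (Int × Int) × List (Int × Int) :=
  if _h : pos.1 ≤ maxCol then
    legE maxCol (pos.1 + 1, pos.2) (grid ++ [(pos.1 + 1, pos.2)])
  else (pos, grid)
termination_by (maxCol - pos.1 + 1).toNat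
decreasing_by omega

def legN (maxRow : Int) (pos : Int × Int) (grid : List (Int × Int)) :
    (Int × Int) × List (Int × Int) :=
  if _h : pos.2 ≤ maxRow then
    legN maxRow (pos.1, pos.2 + 1) (grid ++ [(pos.1, pos.2 + 1)])
  else (pos, grid)
termination_by (maxRow - pos.2 + 1).toNat
decreasing_by omega

def legW (minCol : Int) (pos : Int × Int) (grid : List (Int × Int)) :
    (Int × Int) × List (Int × Int) :=
  if _h : minCol ≤ pos.1 then
    legW minCol (pos.1 - 1, pos.2) (grid ++ [(pos.1 - 1, pos.2)])
  else (pos, grid)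
termination_by (pos.1 - minCol + 1).toNat
decreasing_by omega

def legS (minRow : Int) (pos : Int × Int) (grid : List (Int × Int)) :
    (Int × Int) × List (Int × Int) :=
  if _h : minRow ≤ pos.2 then
    legS minRow (pos.1, pos.2 - 1) (grid ++ [(pos.1, pos.2 - 1)])
  else (pos, grid)
termination_by (pos.2 - minRow + 1).toNat
decreasing_by omega

-- A's outer 'while len(grid) < max_value' loop; fuel is only a totality guard
-- (each iteration appends at least one cell, so max_value.toNat fuel is never exhausted).
def aLoop (fuel : Nat) (max_value : Int) (grid : List (Int × Int)) (direction : String)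
    (pos : Int × Int) (minRow maxRow minCol maxCol : Int) : List (Int × Int) :=
  match fuel with
  | 0 => grid
  | fuel + 1 =>
    if (grid.length : Int) < max_value then
      if direction = "E" then
        let (p, g) := legE maxCol pos grid
        aLoop fuel max_value g "N" p minRow maxRow minCol p.1
      else if direction = "N" then
        let (p, g) := legN maxRow pos grid
        aLoop fuel max_value g "W" p minRow p.2 minCol maxCol
      else if direction = "W" then
        let (p, g) := legW minCol pos grid
        aLoop fuel max_value g "S" p minRow maxRow p.1 maxCol
      else if direction = "S" then
        let (p, g) := legS minRow pos grid
        aLoop fuel max_value g "E" p p.2 maxRow minCol maxCol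
      else grid
    else grid

def make_sequential_grid (max_value : Int) : List (Int × Int) :=
  aLoop max_value.toNat max_value [(0, 0)] "E" (0, 0) 0 0 0 0

-- ===== PORT B =====
-- B's fixed-count leg: move `n` times by (dx,dy), appending each cell.
def legMove (dx dy : Int) (n : Nat) (pos : Int × Int) (grid : List (Int × Int)) :
    (Int × Int) × List (Int × Int) :=
  match n with
  | 0 => (pos, grid)
  | n + 1 => legMove dx dy n (pos.1 + dx, pos.2 + dy) (grid ++ [(pos.1 + dx, pos.2 + dy)])

def dirVec (d : Nat) : Int × Int :=
  if d = 0 then (1, 0) else if d = 1 then (0, 1) else if d = 2 then (-1, 0) else (0, -1)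

-- B's outer loop; same totality guard.
def bLoop (fuel : Nat) (max_value : Int) (grid : List (Int × Int)) (d : Nat) (stepLen : Nat)
    (pos : Int × Int) : List (Int × Int) :=
  match fuel with
  | 0 => grid
  | fuel + 1 =>
    if (grid.length : Int) < max_value then
      let (dx, dy) := dirVec d
      let (p, g) := legMove dx dy stepLen pos grid
      bLoop fuel max_value g ((d + 1) % 4) (if d % 2 = 1 then stepLen + 1 else stepLen) p
    else grid

def make_sequential_grid_alt (max_value : Int) : List (Int × Int) :=
  bLoop max_value.toNat max_value [(0, 0)] 0 1 (0, 0)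

-- ===== PRECONDITION & SPEC =====
def Spec_make_sequential_grid (max_value : Int) (out : List (Int × Int)) : Prop := out = make_sequential_grid_alt max_value
instance (max_value : Int) (out : List (Int × Int)) : Decidable (Spec_make_sequential_grid max_value out) := by unfold Spec_make_sequential_grid; infer_instance

-- ===== CLAIM (what is proved, stated in full; the proofs are below) =====
def Claim_equal_make_sequential_grid : Prop := ∀ (max_value : Int), Dom_make_sequential_grid max_value → Spec_make_sequential_grid max_value (make_sequential_grid max_value)

-- ===== LEMMAS AND PROOFS =====

-- Each of A's condition-driven legs, run from a position whose distance to its bound is n,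
-- equals B's fixed-count leg of n moves.
theorem legE_eq (n : Nat) : ∀ (maxCol : Int) (pos : Int × Int) (grid : List (Int × Int)),
    (n : Int) = maxCol - pos.1 + 1 → legE maxCol pos grid = legMove 1 0 n pos grid := by
  induction n with
  | zero =>
    intro maxCol pos grid h
    rw [legE, legMove]; rw [dif_neg (by omega)]
  | succ n ih =>
    intro maxCol pos grid h
    rw [legE, legMove]; rw [dif_pos (by omega)]
    simp only [add_zero]
    exact ih maxCol (pos.1 + 1, pos.2) (grid ++ [(pos.1 + 1, pos.2)]) (by simp only; omega)

theorem legN_eq (n : Nat) : ∀ (maxRow : Int) (pos : Int × Int) (grid : List (Int × Int)),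
    (n : Int) = maxRow - pos.2 + 1 → legN maxRow pos grid = legMove 0 1 n pos grid := by
  induction n with
  | zero =>
    intro maxRow pos grid h
    rw [legN, legMove]; rw [dif_neg (by omega)]
  | succ n ih =>
    intro maxRow pos grid h
    rw [legN, legMove]; rw [dif_pos (by omega)]
    simp only [add_zero]
    exact ih maxRow (pos.1, pos.2 + 1) (grid ++ [(pos.1, pos.2 + 1)]) (by simp only; omega)

theorem legW_eq (n : Nat) : ∀ (minCol : Int) (pos : Int × Int) (grid : List (Int × Int)),
    (n : Int) = pos.1 - minCol + 1 → legW minCol pos grid = legMove (-1) 0 n pos grid := by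
  induction n with
  | zero =>
    intro minCol pos grid h
    rw [legW, legMove]; rw [dif_neg (by omega)]
  | succ n ih =>
    intro minCol pos grid h
    rw [legW, legMove]; rw [dif_pos (by omega)]
    have h1 : pos.1 + -1 = pos.1 - 1 := by ring
    simp only [h1, add_zero]
    exact ih minCol (pos.1 - 1, pos.2) (grid ++ [(pos.1 - 1, pos.2)]) (by simp only; omega)

theorem legS_eq (n : Nat) : ∀ (minRow : Int) (pos : Int × Int) (grid : List (Int × Int)),
    (n : Int) = pos.2 - minRow + 1 → legS minRow pos grid = legMove 0 (-1) n pos grid := by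
  induction n with
  | zero =>
    intro minRow pos grid h
    rw [legS, legMove]; rw [dif_neg (by omega)]
  | succ n ih =>
    intro minRow pos grid h
    rw [legS, legMove]; rw [dif_pos (by omega)]
    have h1 : pos.2 + -1 = pos.2 - 1 := by ring
    simp only [h1, add_zero]
    exact ih minRow (pos.1, pos.2 - 1) (grid ++ [(pos.1, pos.2 - 1)]) (by simp only; omega)

-- Final position of a fixed-count leg.
theorem legMove_pos (dx dy : Int) (n : Nat) : ∀ (pos : Int × Int) (grid : List (Int × Int)),
    (legMove dx dy n pos grid).1 = (pos.1 + n * dx, pos.2 + n * dy) := by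
  induction n with
  | zero => intro pos grid; simp [legMove]
  | succ n ih =>
    intro pos grid
    rw [legMove, ih]
    push_cast; rw [Prod.mk.injEq]; constructor <;> ring

-- Main invariant: at each leg boundary the two loops carry the same grid and position, A's four
-- bounds and B's (direction index, leg length) both determined by the ring number m and the phase.
theorem loops_eq (fuel : Nat) : ∀ (mv : Int) (grid : List (Int × Int)) (m : Nat),
    (aLoop fuel mv grid "E" (-(m : Int), -(m : Int)) (-(m : Int)) m (-(m : Int)) m
       = bLoop fuel mv grid 0 (2 * m + 1) (-(m : Int), -(m : Int)))
  ∧ (aLoop fuel mv grid "N" ((m : Int) + 1, -(m : Int)) (-(m : Int)) m (-(m : Int)) ((m : Int) + 1)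
       = bLoop fuel mv grid 1 (2 * m + 1) ((m : Int) + 1, -(m : Int)))
  ∧ (aLoop fuel mv grid "W" ((m : Int) + 1, (m : Int) + 1) (-(m : Int)) ((m : Int) + 1) (-(m : Int)) ((m : Int) + 1)
       = bLoop fuel mv grid 2 (2 * m + 2) ((m : Int) + 1, (m : Int) + 1))
  ∧ (aLoop fuel mv grid "S" (-((m : Int) + 1), (m : Int) + 1) (-(m : Int)) ((m : Int) + 1) (-((m : Int) + 1)) ((m : Int) + 1)
       = bLoop fuel mv grid 3 (2 * m + 2) (-((m : Int) + 1), (m : Int) + 1)) := by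
  induction fuel with
  | zero => intro mv grid m; simp [aLoop, bLoop]
  | succ fuel ih =>
    intro mv grid m
    refine ⟨?_, ?_, ?_, ?_⟩
    · rw [aLoop, bLoop]
      by_cases h : (grid.length : Int) < mv
      · rw [if_pos h, if_pos h]
        rw [legE_eq (2 * m + 1) _ _ _ (by simp only; push_cast; ring)]
        norm_num [dirVec]
        cases hp : legMove 1 0 (2 * m + 1) (-(m : Int), -(m : Int)) grid with
        | mk p g =>
          have hpos : p = ((m : Int) + 1, -(m : Int)) := by
            have := legMove_pos 1 0 (2 * m + 1) (-(m : Int), -(m : Int)) grid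
            rw [hp] at this; simp at this
            rw [this, Prod.mk.injEq]; constructor <;> ring
          rw [hpos]
          have := (ih mv g m).2.1
          simpa using this
      · rw [if_neg h, if_neg h]
    · rw [aLoop, bLoop]
      by_cases h : (grid.length : Int) < mv
      · rw [if_pos h, if_pos h]
        rw [legN_eq (2 * m + 1) _ _ _ (by simp only; push_cast; ring)]
        norm_num [dirVec]
        cases hp : legMove 0 1 (2 * m + 1) ((m : Int) + 1, -(m : Int)) grid with
        | mk p g =>
          have hpos : p = ((m : Int) + 1, (m : Int) + 1) := by
            have := legMove_pos 0 1 (2 * m + 1) ((m : Int) + 1, -(m : Int)) grid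
            rw [hp] at this; simp at this
            rw [this, Prod.mk.injEq]; constructor <;> ring
          rw [hpos]
          have := (ih mv g m).2.2.1
          simpa using this
      · rw [if_neg h, if_neg h]
    · rw [aLoop, bLoop]
      by_cases h : (grid.length : Int) < mv
      · rw [if_pos h, if_pos h]
        rw [legW_eq (2 * m + 2) _ _ _ (by simp only; push_cast; ring)]
        norm_num [dirVec]
        cases hp : legMove (-1) 0 (2 * m + 2) ((m : Int) + 1, (m : Int) + 1) grid with
        | mk p g =>
          have hpos : p = (-((m : Int) + 1), (m : Int) + 1) := by
            have := legMove_pos (-1) 0 (2 * m + 2) ((m : Int) + 1, (m : Int) + 1) grid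
            rw [hp] at this; simp at this
            rw [this, Prod.mk.injEq]; constructor <;> ring
          rw [hpos]
          have := (ih mv g m).2.2.2
          simpa using this
      · rw [if_neg h, if_neg h]
    · rw [aLoop, bLoop]
      by_cases h : (grid.length : Int) < mv
      · rw [if_pos h, if_pos h]
        rw [legS_eq (2 * m + 2) _ _ _ (by simp only; push_cast; ring)]
        norm_num [dirVec]
        cases hp : legMove 0 (-1) (2 * m + 2) (-1 + -(m : Int), (m : Int) + 1) grid with
        | mk p g =>
          have hpos : p = (-((m : Int) + 1), -((m : Int) + 1)) := by
            have := legMove_pos 0 (-1) (2 * m + 2) (-1 + -(m : Int), (m : Int) + 1) grid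
            rw [hp] at this; simp at this
            rw [this, Prod.mk.injEq]; constructor <;> ring
          rw [hpos]
          have := (ih mv g (m + 1)).1
          have e2 : 2 * (m + 1) + 1 = 2 * m + 2 + 1 := by ring
          have e3 : (-(((m : Nat) + 1 : Nat) : Int)) = -((m : Int) + 1) := by push_cast; ring
          rw [e2, e3] at this
          simpa using this
      · rw [if_neg h, if_neg h]

-- ===== VERDICT (by name: the statement is the Claim_ definition above) =====
theorem make_sequential_grid_spec : Claim_equal_make_sequential_grid := by
  intro mv _
  unfold Spec_make_sequential_grid make_sequential_grid make_sequential_grid_alt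
  have := (loops_eq mv.toNat mv [(0, 0)] 0).1
  simpa using this
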